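-- pv_equiv track=rewrite | github.com/cs-anonymous-researcher/ADVICE | src/utility/workload_spec.py | dsb_join_origin
-- ===== SOURCE A (Python) =====
-- dsb_foreign_mapping = {
--     "store_sales" : ("ss_cdemo_sk", "customer_demographics", "cd_demo_sk"),
--     "catalog_sales" : ("cs_bill_cdemo_sk", "customer_demographics", "cd_demo_sk"),
--     "catalog_returns" : ("cr_refunded_cdemo_sk", "customer_demographics", "cd_demo_sk"),
--     "web_sales" : ("ws_bill_cdemo_sk", "customer_demographics", "cd_demo_sk"),
--     "web_returns" : ("wr_refunded_cdemo_sk", "customer_demographics", "cd_demo_sk"),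
--     "store_returns": ("sr_cdemo_sk", "customer_demographics", "cd_demo_sk"),
--     "customer": ("c_current_cdemo_sk", "customer_demographics", "cd_demo_sk"),
-- }
--
-- def dsb_join_origin(schema_list, abbr_mapping):
--     """
--     {Description}
--
--     Args:
--         arg1:
--         arg2:
--     Returns:
--         return1:
--         return2:
--     """
--     item_list = []
--     if "customer_demographics" in schema_list:
--         # 包含release的情况
--         for s in schema_list:
--             if s == "customer_demographics":
--                 continue
--             else:
--                 src_col, ref_table, ref_col = dsb_foreign_mapping[s]
--                 item_list.append("{}.{}={}.{}".format(abbr_mapping[s], src_col, abbr_mapping[ref_table], ref_col))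
--     else:
--         # 不包含release的情况
--         ref_col_dict = {}
--
--         for s in schema_list:
--             src_col, ref_table, ref_col = dsb_foreign_mapping[s]
--             # 添加和主键表的连接
--             if (ref_table, ref_col) not in ref_col_dict.keys():
--                 # 如果是第一次出现的等价类，设置连接的参考表
--                 ref_col_dict[(ref_table, ref_col)] = s, src_col
--             else:
--                 join_tbl, join_col = ref_col_dict[(ref_table, ref_col)]
--                 item_list.append("{}.{}={}.{}".\
--                     format(abbr_mapping[s], src_col, abbr_mapping[join_tbl], join_col))
--
--     return item_list
-- ===== SOURCE B (Python) =====
-- dsb_foreign_mapping = {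
--     "store_sales" : ("ss_cdemo_sk", "customer_demographics", "cd_demo_sk"),
--     "catalog_sales" : ("cs_bill_cdemo_sk", "customer_demographics", "cd_demo_sk"),
--     "catalog_returns" : ("cr_refunded_cdemo_sk", "customer_demographics", "cd_demo_sk"),
--     "web_sales" : ("ws_bill_cdemo_sk", "customer_demographics", "cd_demo_sk"),
--     "web_returns" : ("wr_refunded_cdemo_sk", "customer_demographics", "cd_demo_sk"),
--     "store_returns": ("sr_cdemo_sk", "customer_demographics", "cd_demo_sk"),
--     "customer": ("c_current_cdemo_sk", "customer_demographics", "cd_demo_sk"),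
-- }
--
-- def dsb_join_origin(schema_list, abbr_mapping):
--     # Compute one reference (table, column) first, then emit all joins in a single pass.
--     if not schema_list:
--         return []
--     if "customer_demographics" in schema_list:
--         ref_table, ref_col = "customer_demographics", "cd_demo_sk"
--         rest = [s for s in schema_list if s != "customer_demographics"]
--     else:
--         ref_table = schema_list[0]
--         ref_col = dsb_foreign_mapping[ref_table][0]
--         rest = schema_list[1:]
--     return ["{}.{}={}.{}".format(abbr_mapping[s], dsb_foreign_mapping[s][0],
--                                  abbr_mapping[ref_table], ref_col)
--             for s in rest]
-- ===== Notes on version B (the rewrite author's own statement) =====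
-- stated objective: simpler
-- what changed: Instead of A's two separate branches (a skip-loop joining to customer_demographics, and a ref_col_dict that groups tables by (ref_table, ref_col) and joins later occurrences to the first), B computes a single reference (table, column) up front and emits all joins in one pass over the remaining tables.
import Mathlib
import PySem

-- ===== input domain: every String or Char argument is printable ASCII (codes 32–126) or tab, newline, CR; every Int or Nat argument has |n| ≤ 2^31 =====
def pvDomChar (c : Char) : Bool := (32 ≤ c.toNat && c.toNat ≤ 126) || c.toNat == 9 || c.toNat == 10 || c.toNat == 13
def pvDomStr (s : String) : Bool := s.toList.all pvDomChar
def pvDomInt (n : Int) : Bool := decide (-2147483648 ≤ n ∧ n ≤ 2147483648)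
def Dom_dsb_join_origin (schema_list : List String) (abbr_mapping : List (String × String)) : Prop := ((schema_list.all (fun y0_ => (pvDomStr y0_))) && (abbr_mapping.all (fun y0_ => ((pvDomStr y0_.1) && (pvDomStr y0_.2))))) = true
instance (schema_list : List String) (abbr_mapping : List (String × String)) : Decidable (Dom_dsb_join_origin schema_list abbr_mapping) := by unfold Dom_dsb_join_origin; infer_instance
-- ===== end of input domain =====

-- B replaces A's two branches (direct joins to customer_demographics vs. the ref_col_dict
-- equivalence-class grouping) by computing one reference (table, column) up front and emitting
-- all joins in a single pass; objective: simpler.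

-- ===== PORT A =====
-- module-level constant dsb_foreign_mapping (a dict literal with distinct keys)
def pvFM : List (String × (String × String × String)) :=
  [("store_sales", ("ss_cdemo_sk", "customer_demographics", "cd_demo_sk")),
   ("catalog_sales", ("cs_bill_cdemo_sk", "customer_demographics", "cd_demo_sk")),
   ("catalog_returns", ("cr_refunded_cdemo_sk", "customer_demographics", "cd_demo_sk")),
   ("web_sales", ("ws_bill_cdemo_sk", "customer_demographics", "cd_demo_sk")),
   ("web_returns", ("wr_refunded_cdemo_sk", "customer_demographics", "cd_demo_sk")),
   ("store_returns", ("sr_cdemo_sk", "customer_demographics", "cd_demo_sk")),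
   ("customer", ("c_current_cdemo_sk", "customer_demographics", "cd_demo_sk"))]

-- dsb_foreign_mapping[s]: KeyError (= none) is excluded by Pre_, so the default is never read
def pvFmD (s : String) : String × String × String := (pvFM.lookup s).getD ("", "", "")

-- abbr_mapping[s]: KeyError is excluded by Pre_, so the default is never read
def pvAbbrD (m : List (String × String)) (s : String) : String := (m.lookup s).getD ""

def dsb_join_origin (schema_list : List String) (abbr_mapping : List (String × String)) : List String :=
  if "customer_demographics" ∈ schema_list then
    -- branch 1: every non-reference table joins straight to customer_demographics
    schema_list.foldl
      (fun item_list s =>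
        if s = "customer_demographics" then item_list
        else
          let t := pvFmD s
          item_list ++ [pvAbbrD abbr_mapping s ++ "." ++ t.1 ++ "=" ++
                        pvAbbrD abbr_mapping t.2.1 ++ "." ++ t.2.2]) []
  else
    -- branch 2: ref_col_dict groups by (ref_table, ref_col); state = (item_list, ref_col_dict)
    (schema_list.foldl
      (fun (st : List String × PySem.Dict (String × String) (String × String)) s =>
        let t := pvFmD s
        if st.2.contains (t.2.1, t.2.2) = false then
          (st.1, st.2.insert (t.2.1, t.2.2) (s, t.1))
        else
          let j := st.2.getD (t.2.1, t.2.2) ("", "")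
          (st.1 ++ [pvAbbrD abbr_mapping s ++ "." ++ t.1 ++ "=" ++
                    pvAbbrD abbr_mapping j.1 ++ "." ++ j.2], st.2))
      ([], PySem.Dict.empty)).1

-- ===== PORT B =====
def dsb_join_origin_alt (schema_list : List String) (abbr_mapping : List (String × String)) : List String :=
  match schema_list with
  | [] => []
  | s0 :: rest0 =>
    let r :=
      if "customer_demographics" ∈ s0 :: rest0 then
        ("customer_demographics", "cd_demo_sk",
         (s0 :: rest0).filter (fun s => s != "customer_demographics"))
      else
        (s0, (pvFmD s0).1, rest0)
    r.2.2.map (fun s => pvAbbrD abbr_mapping s ++ "." ++ (pvFmD s).1 ++ "=" ++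
                        pvAbbrD abbr_mapping r.1 ++ "." ++ r.2.1)

-- ===== PRECONDITION & SPEC =====
-- Pre_ excludes exactly the KeyError inputs: every schema A looks up must be a key of
-- dsb_foreign_mapping, and every abbreviation A reads must be present in abbr_mapping.
def pvFmKeys : List String :=
  ["store_sales", "catalog_sales", "catalog_returns", "web_sales",
   "web_returns", "store_returns", "customer"]

def Pre_dsb_join_origin (schema_list : List String) (abbr_mapping : List (String × String)) : Prop :=
  if "customer_demographics" ∈ schema_list then
    (∀ s ∈ schema_list, s ≠ "customer_demographics" →
        s ∈ pvFmKeys ∧ (abbr_mapping.lookup s).isSome = true)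
    ∧ (schema_list.any (fun s => s != "customer_demographics") = true →
        (abbr_mapping.lookup "customer_demographics").isSome = true)
  else
    (∀ s ∈ schema_list, s ∈ pvFmKeys)
    ∧ (2 ≤ schema_list.length → ∀ s ∈ schema_list, (abbr_mapping.lookup s).isSome = true)

instance (schema_list : List String) (abbr_mapping : List (String × String)) : Decidable (Pre_dsb_join_origin schema_list abbr_mapping) := by unfold Pre_dsb_join_origin; infer_instance

def pvWitness_dsb_join_origin : List String × (List (String × String)) :=
  (["store_sales", "customer_demographics", "web_sales"],
   [("store_sales", "ss"), ("customer_demographics", "cd"), ("web_sales", "ws")])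

def Spec_dsb_join_origin (schema_list : List String) (abbr_mapping : List (String × String)) (out : List String) : Prop := out = dsb_join_origin_alt schema_list abbr_mapping
instance (schema_list : List String) (abbr_mapping : List (String × String)) (out : List String) : Decidable (Spec_dsb_join_origin schema_list abbr_mapping out) := by unfold Spec_dsb_join_origin; infer_instance

-- ===== CLAIM (what is proved, stated in full; the proofs are below) =====
def Claim_equal_dsb_join_origin : Prop := ∀ (schema_list : List String) (abbr_mapping : List (String × String)), Dom_dsb_join_origin schema_list abbr_mapping → Pre_dsb_join_origin schema_list abbr_mapping → Spec_dsb_join_origin schema_list abbr_mapping (dsb_join_origin schema_list abbr_mapping)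

-- ===== LEMMAS AND PROOFS =====

-- every key of dsb_foreign_mapping maps to reference table customer_demographics, column cd_demo_sk
lemma pvFmD_ref (s : String) (h : s ∈ pvFmKeys) :
    (pvFmD s).2.1 = "customer_demographics" ∧ (pvFmD s).2.2 = "cd_demo_sk" := by
  simp only [pvFmKeys, List.mem_cons, List.not_mem_nil, or_false] at h
  rcases h with h | h | h | h | h | h | h <;> subst h <;> decide

-- branch 1 of A: the skip-customer_demographics loop is append-to-filter-map
lemma pvBranch1 (abbr_mapping : List (String × String)) :
    ∀ (l : List String) (acc : List String),
      (∀ s ∈ l, s ≠ "customer_demographics" → s ∈ pvFmKeys) →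
      l.foldl
        (fun item_list s =>
          if s = "customer_demographics" then item_list
          else
            let t := pvFmD s
            item_list ++ [pvAbbrD abbr_mapping s ++ "." ++ t.1 ++ "=" ++
                          pvAbbrD abbr_mapping t.2.1 ++ "." ++ t.2.2]) acc
      = acc ++ (l.filter (fun s => s != "customer_demographics")).map
          (fun s => pvAbbrD abbr_mapping s ++ "." ++ (pvFmD s).1 ++ "=" ++
                    pvAbbrD abbr_mapping "customer_demographics" ++ "." ++ "cd_demo_sk") := by
  intro l
  induction l with
  | nil => intro acc _; simp
  | cons s l ih =>
    intro acc h
    by_cases hs : s = "customer_demographics"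
    · simp only [List.foldl_cons, if_pos hs, List.filter_cons]
      rw [ih acc (fun x hx => h x (List.mem_cons_of_mem _ hx))]
      simp [hs]
    · obtain ⟨h1, h2⟩ := pvFmD_ref s (h s (List.mem_cons_self) hs)
      simp only [List.foldl_cons, if_neg hs, List.filter_cons]
      rw [ih _ (fun x hx => h x (List.mem_cons_of_mem _ hx))]
      simp [hs, h1, h2]

-- branch 2 of A: once the equivalence class (customer_demographics, cd_demo_sk) has its
-- representative (jt, jc) in ref_col_dict, the loop only appends joins to that representative
lemma pvBranch2 (abbr_mapping : List (String × String)) (jt jc : String) :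
    ∀ (l : List String) (acc : List String)
      (d : PySem.Dict (String × String) (String × String)),
      (∀ s ∈ l, s ∈ pvFmKeys) →
      d.contains ("customer_demographics", "cd_demo_sk") = true →
      d.getD ("customer_demographics", "cd_demo_sk") ("", "") = (jt, jc) →
      (l.foldl
        (fun (st : List String × PySem.Dict (String × String) (String × String)) s =>
          if st.2.contains ((pvFmD s).2.1, (pvFmD s).2.2) = false then
            (st.1, st.2.insert ((pvFmD s).2.1, (pvFmD s).2.2) (s, (pvFmD s).1))
          else
            (st.1 ++ [pvAbbrD abbr_mapping s ++ "." ++ (pvFmD s).1 ++ "=" ++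
                      pvAbbrD abbr_mapping (st.2.getD ((pvFmD s).2.1, (pvFmD s).2.2) ("", "")).1 ++
                      "." ++ (st.2.getD ((pvFmD s).2.1, (pvFmD s).2.2) ("", "")).2], st.2))
        (acc, d)).1
      = acc ++ l.map (fun s => pvAbbrD abbr_mapping s ++ "." ++ (pvFmD s).1 ++ "=" ++
                               pvAbbrD abbr_mapping jt ++ "." ++ jc) := by
  intro l
  induction l with
  | nil => intro acc d _ _ _; simp
  | cons s l ih =>
    intro acc d h hc hg
    obtain ⟨h1, h2⟩ := pvFmD_ref s (h s List.mem_cons_self)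
    simp only [List.foldl_cons, h1, h2, hc, hg, Bool.true_eq_false, if_neg not_false]
    rw [ih _ d (fun x hx => h x (List.mem_cons_of_mem _ hx)) hc hg]
    simp

-- ===== VERDICT (by name: the statement is the Claim_ definition above) =====
theorem dsb_join_origin_spec : Claim_equal_dsb_join_origin := by
  intro schema_list abbr_mapping _ hpre
  show dsb_join_origin schema_list abbr_mapping = dsb_join_origin_alt schema_list abbr_mapping
  unfold dsb_join_origin dsb_join_origin_alt Pre_dsb_join_origin at *
  by_cases hcd : "customer_demographics" ∈ schema_list
  · rw [if_pos hcd] at hpre ⊢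
    cases schema_list with
    | nil => simp at hcd
    | cons s0 rest0 =>
      rw [pvBranch1 abbr_mapping _ [] (fun s hs hne => (hpre.1 s hs hne).1)]
      simp [hcd]
  · rw [if_neg hcd] at hpre ⊢
    cases schema_list with
    | nil => simp
    | cons s0 rest0 =>
      obtain ⟨h1, h2⟩ := pvFmD_ref s0 (hpre.1 s0 List.mem_cons_self)
      simp only [List.foldl_cons, h1, h2, PySem.Dict.contains_empty,
        ]
      rw [if_pos trivial, pvBranch2 abbr_mapping s0 (pvFmD s0).1 rest0 []
        (PySem.Dict.empty.insert ("customer_demographics", "cd_demo_sk") (s0, (pvFmD s0).1))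
        (fun x hx => hpre.1 x (List.mem_cons_of_mem _ hx))
        (PySem.Dict.contains_insert_self _ _ _)
        (PySem.Dict.getD_insert_self _ _ _ _)]
      simp [hcd]
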